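-- pv_equiv track=rewrite | github.com/jimm89/AdventOfCode2025 | Day 2/AOC25_2B.py | sum_rep
-- ===== SOURCE A (Python) =====
-- def sum_first_n(n):
--     return n * (n + 1) // 2
--
-- def sum_range(min_, max_):
--     return sum_first_n(max_) - sum_first_n(min_ - 1)
--
-- def sum_rep(lo, hi, length, rep):
--
--     # discount any repetition lengths which are not a factor of length
--     if length % rep != 0:
--         return 0
--
--     rep = length // rep
--
--     # For ease, let's call the smallest repeating pattern lo_rep and the longest half number hi_rep
--     # This is because each pattern in this range accounts for exactly one possible invalid number, so if rep = 3, 1234 could be 123412341234, an invalid number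
--     lo_rep = 10 ** (length // rep - 1)
--     hi_rep = 10 * lo_rep - 1
--
--     # what's the smallest invalid number that's >= lo and has this length and this degree of repetition?
--     if length > len(str(lo)):
--         min_ = lo_rep
--     else:
--         min_ = lo
--         min_ //= (lo_rep * 10) ** (rep - 1)
--         # try this number, and increment by 1 if too low
--         tmp = min_
--         for i in range(rep - 1):
--             tmp = tmp * (10 * lo_rep) + min_
--         if tmp < lo:
--             min_ += 1
--
--     # what's the largest invalid number that's <= hi and has this length and this degree of repetition?
--     if length < len(str(hi)):
--         max_ = hi_rep
--     else:
--         max_ = hi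
--         max_ //= (lo_rep * 10) ** (rep - 1)
--         tmp = max_
--         for i in range(rep - 1):
--             tmp = tmp * (10 * lo_rep) + max_
--         if tmp > hi:
--             max_ -= 1
--     # So now I know the range of invalid partial numbers, I must sum that range and then multiply by (lo_rep * 10 + 1)**(rep - 1)
--     ret = sum_range(min_, max_)
--     adder = ret
--     for i in range(rep - 1):
--         ret = ret * (10 * lo_rep) + adder
--     return ret
-- ===== SOURCE B (Python) =====
-- def sum_first_n(n):
--     return n * (n + 1) // 2
--
-- def sum_rep(lo, hi, length, rep):
--     # closed-form repunit factor instead of A's three accumulation loops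
--     if length % rep != 0:
--         return 0
--     reps = length // rep            # number of repetitions of the pattern
--     base = 10 ** rep                # weight of one pattern block
--     factor = (base ** reps - 1) // (base - 1)   # 1 + base + ... + base**(reps-1), exact
--     if length > len(str(lo)):
--         min_ = base // 10
--     else:
--         min_ = lo // base ** (reps - 1)
--         if min_ * factor < lo:
--             min_ += 1
--     if length < len(str(hi)):
--         max_ = base - 1
--     else:
--         max_ = hi // base ** (reps - 1)
--         if max_ * factor > hi:
--             max_ -= 1
--     return (sum_first_n(max_) - sum_first_n(min_ - 1)) * factor
-- ===== Notes on version B (the rewrite author's own statement) =====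
-- stated objective: simpler
-- what changed: Replaces A's three repeated-concatenation loops (tmp = tmp*base + x, executed rep-1 times each) by one closed-form repunit factor (base**reps - 1)//(base - 1) computed once and used as a single multiply in the two boundary checks and the final sum.
-- outside the precondition, e.g. on sum_rep(1, 2, 3, 0): A raises ZeroDivisionError, B raises ZeroDivisionError; on sum_rep(1, 2, -3, 3): A returns -499999000500.0, B returns 500000000500.0; on sum_rep(100, 200, 3, -3): A returns 0.0, B returns -0.0
import Mathlib
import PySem

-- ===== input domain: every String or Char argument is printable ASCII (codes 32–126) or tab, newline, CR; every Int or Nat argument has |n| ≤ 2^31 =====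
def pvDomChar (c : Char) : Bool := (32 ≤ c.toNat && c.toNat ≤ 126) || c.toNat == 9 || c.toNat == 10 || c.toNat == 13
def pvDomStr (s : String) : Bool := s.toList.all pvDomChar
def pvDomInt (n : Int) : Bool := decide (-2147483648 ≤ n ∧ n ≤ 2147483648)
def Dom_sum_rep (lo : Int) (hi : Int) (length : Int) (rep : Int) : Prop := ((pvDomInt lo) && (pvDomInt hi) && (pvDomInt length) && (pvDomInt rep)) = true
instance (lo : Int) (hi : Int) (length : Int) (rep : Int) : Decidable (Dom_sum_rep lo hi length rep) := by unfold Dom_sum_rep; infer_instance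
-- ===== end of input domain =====

-- B replaces A's three `tmp = tmp*base + x` accumulation loops by one closed-form
-- repunit factor (base**reps - 1)//(base - 1); objective: simpler (no loops).

-- ===== PORT A =====
def sum_first_n (n : Int) : Int := PySem.Int.floordiv (n * (n + 1)) 2

def sum_range (min_ : Int) (max_ : Int) : Int := sum_first_n max_ - sum_first_n (min_ - 1)

def sum_rep (lo : Int) (hi : Int) (length : Int) (rep : Int) : Int :=
  if PySem.Int.mod length rep ≠ 0 then 0
  else
    let rep := PySem.Int.floordiv length rep
    let lo_rep : Int := 10 ^ (PySem.Int.floordiv length rep - 1).toNat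
    let hi_rep : Int := 10 * lo_rep - 1
    let min_ : Int :=
      if length > ((PySem.Int.toStr lo).length : Int) then lo_rep
      else
        let m := PySem.Int.floordiv lo ((lo_rep * 10) ^ (rep - 1).toNat)
        let tmp := (PySem.List.pyRange 0 (rep - 1) 1).foldl (fun tmp _ => tmp * (10 * lo_rep) + m) m
        if tmp < lo then m + 1 else m
    let max_ : Int :=
      if length < ((PySem.Int.toStr hi).length : Int) then hi_rep
      else
        let m := PySem.Int.floordiv hi ((lo_rep * 10) ^ (rep - 1).toNat)
        let tmp := (PySem.List.pyRange 0 (rep - 1) 1).foldl (fun tmp _ => tmp * (10 * lo_rep) + m) m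
        if tmp > hi then m - 1 else m
    let ret := sum_range min_ max_
    let adder := ret
    (PySem.List.pyRange 0 (rep - 1) 1).foldl (fun ret _ => ret * (10 * lo_rep) + adder) ret

-- ===== PORT B =====
def sum_first_n_alt (n : Int) : Int := PySem.Int.floordiv (n * (n + 1)) 2

def sum_rep_alt (lo : Int) (hi : Int) (length : Int) (rep : Int) : Int :=
  if PySem.Int.mod length rep ≠ 0 then 0
  else
    let reps := PySem.Int.floordiv length rep
    let base : Int := 10 ^ rep.toNat
    let factor := PySem.Int.floordiv (base ^ reps.toNat - 1) (base - 1)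
    let min_ : Int :=
      if length > ((PySem.Int.toStr lo).length : Int) then PySem.Int.floordiv base 10
      else
        let m := PySem.Int.floordiv lo (base ^ (reps - 1).toNat)
        if m * factor < lo then m + 1 else m
    let max_ : Int :=
      if length < ((PySem.Int.toStr hi).length : Int) then base - 1
      else
        let m := PySem.Int.floordiv hi (base ^ (reps - 1).toNat)
        if m * factor > hi then m - 1 else m
    (sum_first_n_alt max_ - sum_first_n_alt (min_ - 1)) * factor

-- ===== PRECONDITION & SPEC =====
-- Pre_ excludes rep = 0 (A raises ZeroDivisionError) and nonpositive length or negative rep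
-- that divides length (A computes 10**negative and returns a float, not an int).
def Pre_sum_rep (lo : Int) (hi : Int) (length : Int) (rep : Int) : Prop := 1 ≤ length ∧ 1 ≤ rep
instance (lo : Int) (hi : Int) (length : Int) (rep : Int) : Decidable (Pre_sum_rep lo hi length rep) := by unfold Pre_sum_rep; infer_instance

def pvWitness_sum_rep : Int × Int × Int × Int := (100, 999, 6, 3)

def Spec_sum_rep (lo : Int) (hi : Int) (length : Int) (rep : Int) (out : Int) : Prop := out = sum_rep_alt lo hi length rep
instance (lo : Int) (hi : Int) (length : Int) (rep : Int) (out : Int) : Decidable (Spec_sum_rep lo hi length rep out) := by unfold Spec_sum_rep; infer_instance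

-- ===== CLAIM (what is proved, stated in full; the proofs are below) =====
def Claim_equal_sum_rep : Prop := ∀ (lo : Int) (hi : Int) (length : Int) (rep : Int), Dom_sum_rep lo hi length rep → Pre_sum_rep lo hi length rep → Spec_sum_rep lo hi length rep (sum_rep lo hi length rep)

-- ===== LEMMAS AND PROOFS =====

-- A's accumulation loop equals multiplication by the geometric (repunit) sum.
theorem pv_foldl_rep (b m : Int) (n : Nat) :
    (PySem.List.pyRange 0 (n : Int) 1).foldl (fun t _ => t * b + m) m
      = m * ∑ i ∈ Finset.range (n + 1), b ^ i := by
  induction n with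
  | zero => simp [PySem.List.pyRange_one_eq_nil]
  | succ n ih =>
    rw [show ((n + 1 : Nat) : Int) = (n : Int) + 1 by push_cast; ring,
        PySem.List.pyRange_one_succ_right (by positivity), List.foldl_append, ih]
    simp only [List.foldl_cons, List.foldl_nil]
    have hgs : ∑ i ∈ Finset.range (n + 1 + 1), b ^ i = b * ∑ i ∈ Finset.range (n + 1), b ^ i + 1 :=
      geom_sum_succ
    rw [hgs]
    ring

-- B's factor division is exact and equals the geometric sum.
theorem pv_factor_eq (b : Int) (hb : 2 ≤ b) (n : Nat) :
    PySem.Int.floordiv (b ^ n - 1) (b - 1) = ∑ i ∈ Finset.range n, b ^ i := by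
  rw [PySem.Int.floordiv_eq_ediv_of_pos (by omega), ← geom_sum_mul b n, mul_comm,
      Int.mul_ediv_cancel_left _ (by omega)]

-- ===== VERDICT =====
theorem sum_rep_spec : Claim_equal_sum_rep := by
  intro lo hi length rep _ hpre
  obtain ⟨hlen, hrep⟩ := hpre
  show sum_rep lo hi length rep = sum_rep_alt lo hi length rep
  unfold sum_rep sum_rep_alt
  by_cases hmod : PySem.Int.mod length rep = 0
  · simp only [hmod, ne_eq, not_true_eq_false, if_false]
    -- divisibility facts
    have hdvd : rep ∣ length := (PySem.Int.mod_eq_zero_iff_dvd length rep).mp hmod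
    obtain ⟨k, hk⟩ := hdvd
    have hkpos : 1 ≤ k := by nlinarith
    have hfd : PySem.Int.floordiv length rep = k := by
      rw [PySem.Int.floordiv_eq_ediv_of_pos (by omega), hk, Int.mul_ediv_cancel_left _ (by omega)]
    have hfd2 : PySem.Int.floordiv length k = rep := by
      rw [PySem.Int.floordiv_eq_ediv_of_pos (by omega), hk, mul_comm,
        Int.mul_ediv_cancel_left _ (by omega)]
    rw [hfd, hfd2]
    -- base facts
    set base : Int := 10 ^ rep.toNat with hbase
    have hrt : rep.toNat = (rep - 1).toNat + 1 := by omega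
    have hbase10 : base = 10 * 10 ^ (rep - 1).toNat := by rw [hbase, hrt, pow_succ]; ring
    have hlorep : (10 : Int) * 10 ^ (rep - 1).toNat = base := hbase10.symm
    have hloB : PySem.Int.floordiv base 10 = 10 ^ (rep - 1).toNat := by
      rw [PySem.Int.floordiv_eq_ediv_of_pos (by norm_num), hbase10,
        Int.mul_ediv_cancel_left _ (by norm_num)]
    have hbase2 : (2 : Int) ≤ base := by
      calc (2 : Int) ≤ 10 ^ 1 := by norm_num
      _ ≤ base := by rw [hbase]; exact pow_le_pow_right₀ (by norm_num) (by omega)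
    -- the geometric sum
    set S : Int := ∑ i ∈ Finset.range k.toNat, base ^ i with hS
    have hkt : (k - 1).toNat + 1 = k.toNat := by omega
    have hkc : ((( k - 1).toNat : Nat) : Int) = k - 1 := by omega
    have hfold : ∀ m : Int,
        (PySem.List.pyRange 0 (k - 1) 1).foldl (fun t _ => t * (10 * 10 ^ (rep - 1).toNat) + m) m
          = m * S := by
      intro m
      rw [← hkc, pv_foldl_rep, hkt, hlorep, hS]
    have hfactor : PySem.Int.floordiv (base ^ k.toNat - 1) (base - 1) = S :=
      pv_factor_eq base hbase2 k.toNat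
    simp only [hfold]
    simp only [hfactor, hloB]
    simp only [mul_comm ((10 : Int) ^ (rep - 1).toNat) 10, ← hbase10]
    simp only [sum_range, sum_first_n, sum_first_n_alt]
  · simp [hmod]
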